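-- pv_equiv track=rewrite | github.com/nishio/atcoder | abc179/d_tle.py | solve
-- ===== SOURCE A (Python) =====
-- MOD = 998244353
--
-- def solve(N, K, SS):
--     count = [-1] * (N + 10)
--     count[0] = 1
--
--     def f(pos):
--         # debug("pos", pos)
--         if pos < 0:
--             return 0
--         if count[pos] > -1:
--             return count[pos]
--         ret = 0
--         for left, right in SS:
--             for i in range(left, right + 1):
--                 j = pos - i
--                 if j < 0:
--                     continue
--                 r = f(j)
--                 count[j] = r
--                 ret += r
--
--         return ret % MOD
--
--     ret = f(N - 1)
--     # debug("count", count)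
--     return ret % MOD
-- ===== SOURCE B (Python) =====
-- MOD = 998244353
--
-- def solve(N, K, SS):
--     # Bottom-up DP over positions with a running prefix-sum list:
--     # each segment contributes a contiguous block of earlier dp values,
--     # read off as a difference of two prefix sums (O(N*K) instead of
--     # O(N * total segment length)).
--     if N <= 0:
--         return 0
--     pref = [0, 1]  # pref[t] = dp[0] + ... + dp[t-1]; dp[0] = 1
--     for p in range(1, N):
--         s = 0
--         for left, right in SS:
--             hi = p - left
--             if right < left or hi < 0:
--                 continue
--             lo = p - right
--             if lo < 0:
--                 lo = 0
--             s += pref[hi + 1] - pref[lo]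
--         pref.append(pref[-1] + s % MOD)
--     return pref[N] - pref[N - 1]
-- ===== Notes on version B (the rewrite author's own statement) =====
-- stated objective: faster
-- what changed: Replaces A's memoized top-down recursion that sums dp over every single step i in every segment (O(N * total segment length)) by a bottom-up DP that keeps a running prefix-sum list and reads each segment's whole contribution as one difference of two prefix sums (O(N*K)).
import Mathlib
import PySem

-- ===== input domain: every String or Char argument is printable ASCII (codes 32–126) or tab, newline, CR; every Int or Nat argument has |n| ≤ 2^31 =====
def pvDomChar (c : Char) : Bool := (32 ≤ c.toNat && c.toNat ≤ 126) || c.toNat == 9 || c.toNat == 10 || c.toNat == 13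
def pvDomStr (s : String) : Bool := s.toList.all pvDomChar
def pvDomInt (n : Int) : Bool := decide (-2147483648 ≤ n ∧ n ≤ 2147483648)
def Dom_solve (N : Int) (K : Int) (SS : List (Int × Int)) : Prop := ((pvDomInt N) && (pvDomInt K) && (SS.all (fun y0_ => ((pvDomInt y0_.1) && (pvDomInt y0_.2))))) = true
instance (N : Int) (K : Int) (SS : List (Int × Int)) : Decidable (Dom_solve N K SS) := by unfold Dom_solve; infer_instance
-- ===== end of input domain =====

-- B replaces A's memoized recursion (summing dp over every single step of every segment) by a
-- bottom-up prefix-sum DP that reads each segment's whole contribution as one difference of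
-- two prefix sums (objective: faster, asymptotically).


def MODC : Int := 998244353

-- ===== PORT A =====
-- memoized recursion; `fuel` is a port artifact bounding the recursion depth (Python's
-- recursion is unbounded): under Pre_solve every recursive call strictly decreases pos,
-- so fuel = pos+1 at the top call is never exhausted.
def fA (SS : List (Int × Int)) (fuel : Nat) (pos : Int) (count : List Int) : Int × List Int :=
  if pos < 0 then (0, count)
  else
    match fuel with
    | 0 => (0, count)                                   -- unreachable under Pre_solve
    | fuel + 1 =>
      match PySem.List.pyGet? count pos with
      | none => (0, count)                              -- Python: IndexError (outside Pre_solve)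
      | some c =>
        if c > -1 then (c, count)
        else
          let st := SS.foldl (fun st s =>
            (PySem.List.pyRange s.1 (s.2 + 1) 1).foldl (fun st i =>
              let j := pos - i
              if j < 0 then st
              else
                let q := fA SS fuel j st.2
                (st.1 + q.1, PySem.List.pySetD q.2 j q.1)) st) (0, count)
          (PySem.Int.mod st.1 MODC, st.2)
termination_by fuel
decreasing_by omega

def solve (N : Int) (K : Int) (SS : List (Int × Int)) : Int :=
  let count := PySem.List.pySetD (List.replicate (N + 10).toNat (-1)) 0 1
  PySem.Int.mod (fA SS ((N - 1).toNat + 1) (N - 1) count).1 MODC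

-- ===== PORT B =====
def solve_alt (N : Int) (K : Int) (SS : List (Int × Int)) : Int :=
  if N ≤ 0 then 0
  else
    let pref := (PySem.List.pyRange 1 N 1).foldl (fun pref p =>
      let s := SS.foldl (fun s lr =>
        let hi := p - lr.1
        if lr.2 < lr.1 ∨ hi < 0 then s
        else
          let lo := if p - lr.2 < 0 then 0 else p - lr.2
          s + (PySem.List.pyGetD pref (hi + 1) 0 - PySem.List.pyGetD pref lo 0)) 0
      pref ++ [PySem.List.pyGetD pref (-1) 0 + PySem.Int.mod s MODC]) [0, 1]
    PySem.List.pyGetD pref N 0 - PySem.List.pyGetD pref (N - 1) 0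

-- ===== PRECONDITION & SPEC =====
-- Pre_solve excludes only inputs on which the Python A raises: N ≤ -10 (IndexError on
-- `count[0] = 1` of an empty list) and N ≥ 2 with a nonempty segment whose left end is ≤ 0
-- (unbounded recursion / IndexError).  A returns on every input admitted here.
def Pre_solve (N : Int) (K : Int) (SS : List (Int × Int)) : Prop :=
  -9 ≤ N ∧ (2 ≤ N → ∀ s ∈ SS, 1 ≤ s.1 ∨ s.2 < s.1)
instance (N : Int) (K : Int) (SS : List (Int × Int)) : Decidable (Pre_solve N K SS) := by
  unfold Pre_solve; infer_instance

def pvWitness_solve : Int × Int × (List (Int × Int)) := (7, 2, [(1, 2), (4, 4)])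

def Spec_solve (N : Int) (K : Int) (SS : List (Int × Int)) (out : Int) : Prop := out = solve_alt N K SS
instance (N : Int) (K : Int) (SS : List (Int × Int)) (out : Int) : Decidable (Spec_solve N K SS out) := by unfold Spec_solve; infer_instance

-- ===== CLAIM (what is proved, stated in full; the proofs are below) =====
def Claim_equal_solve : Prop := ∀ (N : Int) (K : Int) (SS : List (Int × Int)), Dom_solve N K SS → Pre_solve N K SS → Spec_solve N K SS (solve N K SS)

-- ===== LEMMAS AND PROOFS =====

-- The mathematical recurrence both programs compute: dp 0 = 1 and, for p >= 1,
-- dp p = (sum over segments (l,r) of sum_{i=l..r, p-i>=0} dp (p-i)) mod MODC.  The `min ... p`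
-- clamp only makes the recursion total; under Pre_solve every step i is >= 1, so it is the identity.
def dp (SS : List (Int × Int)) : Nat → Int
  | 0 => 1
  | p + 1 =>
    PySem.Int.mod
      ((SS.map (fun s =>
        ((PySem.List.pyRange s.1 (s.2 + 1) 1).map (fun i =>
          if ((p : Int) + 1) - i < 0 then 0
          else dp SS (min (((p : Int) + 1) - i).toNat p))).sum)).sum) MODC
termination_by p => p
decreasing_by exact Nat.lt_succ_of_le (Nat.min_le_right _ _)

def PF (SS : List (Int × Int)) (t : Nat) : Int := ∑ q ∈ Finset.range t, dp SS q

def Good (SS : List (Int × Int)) (count : List Int) : Prop :=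
  ∀ k, (hk : k < count.length) → count[k] = dp SS k ∨ (count[k] = -1 ∧ 0 < k)


-- a segment's total contribution at position p'+1 is a difference of two prefix sums

lemma list_sum_range (n : Nat) (F : Nat → Int) :
    ((List.range n).map F).sum = ∑ k ∈ Finset.range n, F k := by
  induction n with
  | zero => simp
  | succ n ih => simp [List.range_succ, Finset.sum_range_succ, ih]

lemma dp_nonneg (SS : List (Int × Int)) (p : Nat) : 0 ≤ dp SS p := by
  cases p with
  | zero => simp [dp]
  | succ p => rw [dp]; exact PySem.Int.mod_nonneg _ (by decide)

lemma dp_lt (SS : List (Int × Int)) (p : Nat) : dp SS p < MODC := by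
  cases p with
  | zero => simp only [dp]; decide
  | succ p => rw [dp]; exact PySem.Int.mod_lt _ (by decide)

lemma seg_sum (g : Nat → Int) (l r : Int) (hl : 1 ≤ l) (p' : Nat) :
    ((PySem.List.pyRange l (r + 1) 1).map (fun i =>
        if ((p' : Int) + 1) - i < 0 then 0
        else g (min (((p' : Int) + 1) - i).toNat p'))).sum
    = if r < l ∨ ((p' : Int) + 1) - l < 0 then 0
      else (∑ q ∈ Finset.range ((((p' : Int) + 1) - l).toNat + 1), g q)
           - ∑ q ∈ Finset.range ((((p' : Int) + 1) - r).toNat), g q := by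
  by_cases hrl : r < l
  · rw [if_pos (Or.inl hrl), PySem.List.pyRange_one_eq_nil (by omega)]
    simp
  by_cases hpl : ((p' : Int) + 1) - l < 0
  · rw [if_pos (Or.inr hpl)]
    apply List.sum_eq_zero
    intro x hx
    obtain ⟨i, hi, rfl⟩ := List.mem_map.1 hx
    rw [PySem.List.mem_pyRange_one] at hi
    rw [if_pos (by omega)]
  · rw [if_neg (by tauto)]
    rw [PySem.List.pyRange_one, List.map_map, list_sum_range]
    set n : Nat := (r + 1 - l).toNat with hn
    set hi : Nat := (((p' : Int) + 1) - l).toNat with hhi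
    set lo : Nat := (((p' : Int) + 1) - r).toNat with hlo
    set m : Nat := min n (hi + 1) with hm
    have hsub : Finset.range m ⊆ Finset.range n :=
      fun x hx => Finset.mem_range.2 (lt_of_lt_of_le (Finset.mem_range.1 hx) (Nat.min_le_left _ _))
    have hzero : ∀ k ∈ Finset.range n, k ∉ Finset.range m →
        ((fun i => if ((p' : Int) + 1) - i < 0 then 0
          else g (min (((p' : Int) + 1) - i).toNat p')) ∘ (fun k : Nat => l + (k : Int))) k = 0 := by
      intro k hk hnk
      simp only [Finset.mem_range] at hk hnk
      simp only [Function.comp]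
      rw [if_pos (by omega)]
    rw [← Finset.sum_subset hsub hzero]
    have e1 : ∑ k ∈ Finset.range m,
          ((fun i => if ((p' : Int) + 1) - i < 0 then 0
            else g (min (((p' : Int) + 1) - i).toNat p')) ∘ (fun k : Nat => l + (k : Int))) k
        = ∑ k ∈ Finset.range m, g (hi - k) := by
      apply Finset.sum_congr rfl
      intro k hk
      have hk' : k < m := Finset.mem_range.1 hk
      simp only [Function.comp]
      rw [if_neg (by omega), min_eq_left (by omega)]
      congr 1
      omega
    rw [e1]
    have e2 : ∑ k ∈ Finset.range m, g (hi - k)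
        = ∑ j ∈ Finset.Ico (hi + 1 - m) (hi + 1), g j := by
      rw [Finset.sum_Ico_eq_sum_range]
      rw [show hi + 1 - (hi + 1 - m) = m by omega]
      rw [← Finset.sum_range_reflect]
      apply Finset.sum_congr rfl
      intro k hk
      have : k < m := Finset.mem_range.1 hk
      congr 1
      omega
    rw [e2, Finset.sum_Ico_eq_sub _ (by omega)]
    rw [show hi + 1 - m = lo by omega]

lemma innerFold_spec (SS : List (Int × Int)) (fuel : Nat) (pos : Int) (L : Nat)
    (hrec : ∀ (j : Int) (count : List Int), 0 ≤ j → j < (fuel : Int) → j < (count.length : Int) →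
      Good SS count →
      (fA SS fuel j count).1 = dp SS j.toNat ∧ Good SS (fA SS fuel j count).2 ∧
      (fA SS fuel j count).2.length = count.length)
    (hpos : 0 ≤ pos) (hposL : pos < (L : Int)) (hposf : pos ≤ (fuel : Int)) :
    ∀ (is : List Int), (∀ i ∈ is, 1 ≤ i) → ∀ (acc : Int) (count : List Int),
      Good SS count → count.length = L →
      (is.foldl (fun st i =>
          let j := pos - i
          if j < 0 then st
          else
            let q := fA SS fuel j st.2
            (st.1 + q.1, PySem.List.pySetD q.2 j q.1)) (acc, count)).1
        = acc + (is.map (fun i => if pos - i < 0 then 0 else dp SS (pos - i).toNat)).sum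
      ∧ Good SS (is.foldl (fun st i =>
          let j := pos - i
          if j < 0 then st
          else
            let q := fA SS fuel j st.2
            (st.1 + q.1, PySem.List.pySetD q.2 j q.1)) (acc, count)).2
      ∧ (is.foldl (fun st i =>
          let j := pos - i
          if j < 0 then st
          else
            let q := fA SS fuel j st.2
            (st.1 + q.1, PySem.List.pySetD q.2 j q.1)) (acc, count)).2.length = L := by
  intro is
  induction is with
  | nil =>
    intro _ acc count hG hL
    simpa using ⟨hG, hL⟩
  | cons i tl ih =>
    intro his acc count hG hL
    have hi1 : 1 ≤ i := his i (List.mem_cons_self ..)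
    have htl : ∀ x ∈ tl, 1 ≤ x := fun x hx => his x (List.mem_cons_of_mem _ hx)
    rw [List.foldl_cons, List.map_cons, List.sum_cons]
    by_cases hj : pos - i < 0
    · simp only [if_pos hj]
      obtain ⟨h1, h2, h3⟩ := ih htl acc count hG hL
      exact ⟨by rw [h1]; ring, h2, h3⟩
    · simp only [if_neg hj]
      have h0j : 0 ≤ pos - i := by omega
      obtain ⟨hq1, hq2, hq3⟩ := hrec (pos - i) count (by omega) (by omega) (by omega) hG
      set q := fA SS fuel (pos - i) count with hq
      have hset : PySem.List.pySetD q.2 (pos - i) q.1 = q.2.set (pos - i).toNat q.1 :=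
        PySem.List.pySetD_of_nonneg q.2 q.1 h0j
      have hG' : Good SS (q.2.set (pos - i).toNat q.1) := by
        intro k hk
        have hk2 : k < q.2.length := by simpa using hk
        by_cases hk0 : k = (pos - i).toNat
        · subst hk0
          rw [List.getElem_set_self hk]
          left
          rw [hq1]
        · rw [List.getElem_set_ne (by omega) hk]
          exact hq2 k hk2
      have hL' : (q.2.set (pos - i).toNat q.1).length = L := by
        rw [List.length_set, hq3, hL]
      obtain ⟨h1, h2, h3⟩ := ih htl (acc + q.1) _ hG' hL'
      rw [hset]
      exact ⟨by rw [h1, hq1]; ring, h2, h3⟩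

lemma outerFold_spec (SS : List (Int × Int)) (fuel : Nat) (pos : Int) (L : Nat)
    (hrec : ∀ (j : Int) (count : List Int), 0 ≤ j → j < (fuel : Int) → j < (count.length : Int) →
      Good SS count →
      (fA SS fuel j count).1 = dp SS j.toNat ∧ Good SS (fA SS fuel j count).2 ∧
      (fA SS fuel j count).2.length = count.length)
    (hpos : 0 ≤ pos) (hposL : pos < (L : Int)) (hposf : pos ≤ (fuel : Int)) :
    ∀ (ss : List (Int × Int)), (∀ s ∈ ss, 1 ≤ s.1 ∨ s.2 < s.1) →
      ∀ (acc : Int) (count : List Int), Good SS count → count.length = L →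
      (ss.foldl (fun st s =>
          (PySem.List.pyRange s.1 (s.2 + 1) 1).foldl (fun st i =>
            let j := pos - i
            if j < 0 then st
            else
              let q := fA SS fuel j st.2
              (st.1 + q.1, PySem.List.pySetD q.2 j q.1)) st) (acc, count)).1
        = acc + (ss.map (fun s =>
            ((PySem.List.pyRange s.1 (s.2 + 1) 1).map (fun i =>
              if pos - i < 0 then 0 else dp SS (pos - i).toNat)).sum)).sum
      ∧ Good SS (ss.foldl (fun st s =>
          (PySem.List.pyRange s.1 (s.2 + 1) 1).foldl (fun st i =>
            let j := pos - i
            if j < 0 then st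
            else
              let q := fA SS fuel j st.2
              (st.1 + q.1, PySem.List.pySetD q.2 j q.1)) st) (acc, count)).2
      ∧ (ss.foldl (fun st s =>
          (PySem.List.pyRange s.1 (s.2 + 1) 1).foldl (fun st i =>
            let j := pos - i
            if j < 0 then st
            else
              let q := fA SS fuel j st.2
              (st.1 + q.1, PySem.List.pySetD q.2 j q.1)) st) (acc, count)).2.length = L := by
  intro ss
  induction ss with
  | nil =>
    intro _ acc count hG hL
    simpa using ⟨hG, hL⟩
  | cons s tl ih =>
    intro hss acc count hG hL
    have hs : 1 ≤ s.1 ∨ s.2 < s.1 := hss s (List.mem_cons_self ..)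
    have htl : ∀ x ∈ tl, 1 ≤ x.1 ∨ x.2 < x.1 := fun x hx => hss x (List.mem_cons_of_mem _ hx)
    have hiall : ∀ i ∈ PySem.List.pyRange s.1 (s.2 + 1) 1, 1 ≤ i := by
      intro i hi
      rw [PySem.List.mem_pyRange_one] at hi
      rcases hs with h | h <;> omega
    rw [List.foldl_cons, List.map_cons, List.sum_cons]
    obtain ⟨h1, h2, h3⟩ := innerFold_spec SS fuel pos L hrec hpos hposL hposf
      (PySem.List.pyRange s.1 (s.2 + 1) 1) hiall acc count hG hL
    have heq : (PySem.List.pyRange s.1 (s.2 + 1) 1).foldl (fun st i =>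
            let j := pos - i
            if j < 0 then st
            else
              let q := fA SS fuel j st.2
              (st.1 + q.1, PySem.List.pySetD q.2 j q.1)) (acc, count)
        = ((acc + ((PySem.List.pyRange s.1 (s.2 + 1) 1).map (fun i =>
              if pos - i < 0 then 0 else dp SS (pos - i).toNat)).sum),
           ((PySem.List.pyRange s.1 (s.2 + 1) 1).foldl (fun st i =>
            let j := pos - i
            if j < 0 then st
            else
              let q := fA SS fuel j st.2
              (st.1 + q.1, PySem.List.pySetD q.2 j q.1)) (acc, count)).2) :=
      Prod.ext h1 rfl
    rw [heq]
    obtain ⟨g1, g2, g3⟩ := ih htl _ _ h2 h3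
    exact ⟨by rw [g1]; ring, g2, g3⟩

lemma fA_spec (SS : List (Int × Int)) (hSS : ∀ s ∈ SS, 1 ≤ s.1 ∨ s.2 < s.1) :
    ∀ (fuel : Nat) (pos : Int) (count : List Int), 0 ≤ pos → pos < (fuel : Int) →
      pos < (count.length : Int) → Good SS count →
      (fA SS fuel pos count).1 = dp SS pos.toNat ∧ Good SS (fA SS fuel pos count).2 ∧
      (fA SS fuel pos count).2.length = count.length := by
  intro fuel
  induction fuel with
  | zero =>
    intro pos count h0 hf hlen hG
    exfalso
    simp at hf
    omega
  | succ fuel ih =>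
    intro pos count h0 hf hlen hG
    have hget : PySem.List.pyGet? count pos = some (count[pos.toNat]'(by omega)) :=
      PySem.List.pyGet?_eq_some_getElem count h0 hlen
    rw [fA, if_neg (by omega)]
    simp only [hget]
    by_cases hc : count[pos.toNat]'(by omega) > -1
    · rw [if_pos hc]
      rcases hG pos.toNat (by omega) with h | h
      · exact ⟨h, hG, rfl⟩
      · omega
    · rw [if_neg hc]
      have hpos1 : 0 < pos.toNat := by
        rcases hG pos.toNat (by omega) with h | h
        · have := dp_nonneg SS pos.toNat
          omega
        · exact h.2
      obtain ⟨h1, h2, h3⟩ := outerFold_spec SS fuel pos count.length ih h0 (by omega)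
        (by omega) SS hSS 0 count hG rfl
      refine ⟨?_, h2, h3⟩
      change PySem.Int.mod _ MODC = _
      obtain ⟨p', hp'⟩ : ∃ p', pos.toNat = p' + 1 := ⟨pos.toNat - 1, by omega⟩
      have hcast : pos = ((p' : Int) + 1) := by omega
      rw [h1, zero_add, hp', dp]
      refine congrArg (fun z => PySem.Int.mod z MODC) ?_
      refine congrArg List.sum ?_
      apply List.map_congr_left
      intro s hs
      apply congrArg
      apply List.map_congr_left
      intro i hi
      rw [PySem.List.mem_pyRange_one] at hi
      rcases hSS s hs with h | h
      · have hi1 : 1 ≤ i := by omega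
        rw [hcast]
        by_cases hcond : ((p' : Int) + 1) - i < 0
        · rw [if_pos hcond, if_pos hcond]
        · rw [if_neg hcond, if_neg hcond, min_eq_left (by omega)]
      · omega

lemma solve_eq_dp (N : Int) (K : Int) (SS : List (Int × Int)) (hN : 1 ≤ N)
    (hSS : ∀ s ∈ SS, 1 ≤ s.1 ∨ s.2 < s.1) : solve N K SS = dp SS (N - 1).toNat := by
  have hlen : (List.replicate (N + 10).toNat (-1 : Int)).length = (N + 10).toNat :=
    List.length_replicate
  have hc0 : PySem.List.pySetD (List.replicate (N + 10).toNat (-1 : Int)) 0 1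
      = (List.replicate (N + 10).toNat (-1 : Int)).set 0 1 :=
    PySem.List.pySetD_of_nonneg _ 1 le_rfl
  have hG : Good SS ((List.replicate (N + 10).toNat (-1 : Int)).set 0 1) := by
    intro k hk
    have hk2 : k < (N + 10).toNat := by simpa using hk
    by_cases hk0 : k = 0
    · subst hk0
      left
      rw [List.getElem_set_self hk]
      simp [dp]
    · right
      rw [List.getElem_set_ne (by omega) hk]
      exact ⟨List.getElem_replicate _, by omega⟩
  obtain ⟨h1, _, _⟩ := fA_spec SS hSS ((N - 1).toNat + 1) (N - 1)
    ((List.replicate (N + 10).toNat (-1 : Int)).set 0 1)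
    (by omega) (by omega) (by rw [List.length_set, hlen]; omega) hG
  show PySem.Int.mod (fA SS ((N - 1).toNat + 1) (N - 1)
    (PySem.List.pySetD (List.replicate (N + 10).toNat (-1 : Int)) 0 1)).1 MODC = _
  rw [hc0, h1, PySem.Int.mod_eq_emod_of_pos (by decide),
    Int.emod_eq_of_lt (dp_nonneg _ _) (dp_lt _ _)]

lemma B_seg (SS : List (Int × Int)) (m : Nat) (s : Int × Int) (hs : 1 ≤ s.1 ∨ s.2 < s.1) :
    (if s.2 < s.1 ∨ (1 + (m : Int)) - s.1 < 0 then (0 : Int)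
     else
       (PySem.List.pyGetD ((List.range (m + 2)).map (PF SS)) (((1 + (m : Int)) - s.1) + 1) 0
        - PySem.List.pyGetD ((List.range (m + 2)).map (PF SS))
            (if (1 + (m : Int)) - s.2 < 0 then 0 else (1 + (m : Int)) - s.2) 0))
    = ((PySem.List.pyRange s.1 (s.2 + 1) 1).map (fun i =>
          if ((m : Int) + 1) - i < 0 then 0
          else dp SS (min (((m : Int) + 1) - i).toNat m))).sum := by
  rcases hs with h1 | h1
  · rw [seg_sum (dp SS) s.1 s.2 h1 m]
    by_cases hc : s.2 < s.1 ∨ ((m : Int) + 1) - s.1 < 0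
    · rw [if_pos (show s.2 < s.1 ∨ (1 + (m : Int)) - s.1 < 0 from
          hc.imp id (fun h => by omega)), if_pos hc]
    · push_neg at hc
      rw [if_neg (show ¬(s.2 < s.1 ∨ (1 + (m : Int)) - s.1 < 0) by omega),
        if_neg (show ¬(s.2 < s.1 ∨ ((m : Int) + 1) - s.1 < 0) by omega)]
      have hg1 : PySem.List.pyGetD ((List.range (m + 2)).map (PF SS))
          (((1 + (m : Int)) - s.1) + 1) 0 = PF SS ((((1 + (m : Int)) - s.1) + 1)).toNat := by
        rw [PySem.List.pyGetD_eq_getElem _ _ (by omega) (by simp; omega)]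
        rw [List.getElem_map, List.getElem_range]
      have hg2 : PySem.List.pyGetD ((List.range (m + 2)).map (PF SS))
          (if (1 + (m : Int)) - s.2 < 0 then 0 else (1 + (m : Int)) - s.2) 0
          = PF SS ((if (1 + (m : Int)) - s.2 < 0 then (0 : Int) else (1 + (m : Int)) - s.2)).toNat := by
        rw [PySem.List.pyGetD_eq_getElem _ _ (by split_ifs <;> omega) (by simp; split_ifs <;> omega)]
        rw [List.getElem_map, List.getElem_range]
      rw [hg1, hg2]
      rw [show (((1 + (m : Int)) - s.1) + 1).toNat = (((m : Int) + 1) - s.1).toNat + 1 by omega]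
      rw [show ((if (1 + (m : Int)) - s.2 < 0 then (0 : Int) else (1 + (m : Int)) - s.2)).toNat
          = (((m : Int) + 1) - s.2).toNat by split_ifs <;> omega]
      rfl
  · rw [if_pos (Or.inl h1), PySem.List.pyRange_one_eq_nil (by omega)]
    simp

lemma B_loop (SS : List (Int × Int)) (hSS : ∀ s ∈ SS, 1 ≤ s.1 ∨ s.2 < s.1) (m : Nat) :
    (PySem.List.pyRange 1 (1 + (m : Int)) 1).foldl (fun pref p =>
      let s := SS.foldl (fun s lr =>
        let hi := p - lr.1
        if lr.2 < lr.1 ∨ hi < 0 then s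
        else
          let lo := if p - lr.2 < 0 then 0 else p - lr.2
          s + (PySem.List.pyGetD pref (hi + 1) 0 - PySem.List.pyGetD pref lo 0)) 0
      pref ++ [PySem.List.pyGetD pref (-1) 0 + PySem.Int.mod s MODC]) [0, 1]
    = (List.range (m + 2)).map (PF SS) := by
  induction m with
  | zero =>
    rw [PySem.List.pyRange_one_eq_nil (by norm_num), List.foldl_nil]
    rw [show List.range (0 + 2) = [0, 1] from rfl]
    simp only [List.map_cons, List.map_nil]
    rw [show PF SS 0 = 0 from rfl]
    rw [show PF SS 1 = dp SS 0 from by simp [PF]]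
    simp [dp]
  | succ m ih =>
    rw [show (1 : Int) + ((m + 1 : Nat) : Int) = (1 + (m : Int)) + 1 by push_cast; ring]
    rw [PySem.List.pyRange_one_succ_right (by omega), List.foldl_append, ih,
      List.foldl_cons, List.foldl_nil]
    simp only []
    have hlast : PySem.List.pyGetD ((List.range (m + 2)).map (PF SS)) (-1) 0 = PF SS (m + 1) := by
      rw [show List.range (m + 2) = List.range (m + 1) ++ [m + 1] from List.range_succ,
        List.map_append]
      exact PySem.List.pyGetD_neg_one_append_singleton ..
    have hfold : SS.foldl (fun s lr =>
        let hi := (1 + (m : Int)) - lr.1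
        if lr.2 < lr.1 ∨ hi < 0 then s
        else
          let lo := if (1 + (m : Int)) - lr.2 < 0 then 0 else (1 + (m : Int)) - lr.2
          s + (PySem.List.pyGetD ((List.range (m + 2)).map (PF SS)) (hi + 1) 0
               - PySem.List.pyGetD ((List.range (m + 2)).map (PF SS)) lo 0)) 0
        = 0 + (SS.map (fun s =>
            ((PySem.List.pyRange s.1 (s.2 + 1) 1).map (fun i =>
              if ((m : Int) + 1) - i < 0 then 0
              else dp SS (min (((m : Int) + 1) - i).toNat m))).sum)).sum := by
      rw [PySem.List.foldl_congr_mem SS _ (fun (s : Int) lr =>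
        s + (if lr.2 < lr.1 ∨ (1 + (m : Int)) - lr.1 < 0 then (0 : Int)
             else
               (PySem.List.pyGetD ((List.range (m + 2)).map (PF SS)) (((1 + (m : Int)) - lr.1) + 1) 0
                - PySem.List.pyGetD ((List.range (m + 2)).map (PF SS))
                    (if (1 + (m : Int)) - lr.2 < 0 then 0 else (1 + (m : Int)) - lr.2) 0))) 0
        (by intro acc x _; simp only []; split_ifs <;> simp)]
      rw [PySem.List.foldl_add]
      have hmaps : (SS.map (fun lr : Int × Int =>
          if lr.2 < lr.1 ∨ (1 + (m : Int)) - lr.1 < 0 then (0 : Int)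
          else
            (PySem.List.pyGetD ((List.range (m + 2)).map (PF SS)) (((1 + (m : Int)) - lr.1) + 1) 0
             - PySem.List.pyGetD ((List.range (m + 2)).map (PF SS))
                 (if (1 + (m : Int)) - lr.2 < 0 then 0 else (1 + (m : Int)) - lr.2) 0)))
          = SS.map (fun s => ((PySem.List.pyRange s.1 (s.2 + 1) 1).map (fun i =>
              if ((m : Int) + 1) - i < 0 then 0
              else dp SS (min (((m : Int) + 1) - i).toNat m))).sum) :=
        List.map_congr_left (fun s hs => B_seg SS m s (hSS s hs))
      rw [hmaps]
    rw [hlast, hfold, zero_add]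
    rw [show List.range (m + 1 + 2) = List.range (m + 2) ++ [m + 2] from List.range_succ,
      List.map_append]
    congr 1
    rw [show List.map (PF SS) [m + 2] = [PF SS (m + 2)] from rfl]
    rw [show PF SS (m + 2) = PF SS (m + 1) + dp SS (m + 1) from Finset.sum_range_succ ..]
    rw [show (dp SS (m + 1)) = PySem.Int.mod ((SS.map (fun s =>
            ((PySem.List.pyRange s.1 (s.2 + 1) 1).map (fun i =>
              if ((m : Int) + 1) - i < 0 then 0
              else dp SS (min (((m : Int) + 1) - i).toNat m))).sum)).sum) MODC from by rw [dp]]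

lemma solve_alt_eq_dp (N : Int) (K : Int) (SS : List (Int × Int)) (hN : 1 ≤ N)
    (hSS : ∀ s ∈ SS, 1 ≤ s.1 ∨ s.2 < s.1) : solve_alt N K SS = dp SS (N - 1).toNat := by
  obtain ⟨m, rfl⟩ : ∃ m : Nat, N = 1 + (m : Int) := ⟨(N - 1).toNat, by omega⟩
  unfold solve_alt
  rw [if_neg (by omega)]
  simp only [B_loop SS hSS m]
  have hget : ∀ (t : Int), 0 ≤ t → t < (m : Int) + 2 →
      PySem.List.pyGetD ((List.range (m + 2)).map (PF SS)) t 0 = PF SS t.toNat := by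
    intro t ht0 ht2
    rw [PySem.List.pyGetD_eq_getElem _ _ ht0 (by simp; omega)]
    rw [List.getElem_map, List.getElem_range]
  rw [hget _ (by omega) (by omega), hget _ (by omega) (by omega)]
  rw [show ((1 : Int) + (m : Int)).toNat = m + 1 by omega,
    show ((1 : Int) + (m : Int) - 1).toNat = m by omega]
  rw [show PF SS (m + 1) = PF SS m + dp SS m from Finset.sum_range_succ ..]
  ring

lemma solve_nonpos (N : Int) (K : Int) (SS : List (Int × Int)) (hN : N ≤ 0) :
    solve N K SS = 0 := by
  show PySem.Int.mod (fA SS ((N - 1).toNat + 1) (N - 1)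
    (PySem.List.pySetD (List.replicate (N + 10).toNat (-1 : Int)) 0 1)).1 MODC = 0
  rw [fA, if_pos (by omega)]
  rfl

lemma solve_one (K : Int) (SS : List (Int × Int)) : solve 1 K SS = 1 := by
  show PySem.Int.mod (fA SS (((1 : Int) - 1).toNat + 1) ((1 : Int) - 1)
    (PySem.List.pySetD (List.replicate ((1 : Int) + 10).toNat (-1 : Int)) 0 1)).1 MODC = 1
  rw [show PySem.List.pySetD (List.replicate ((1 : Int) + 10).toNat (-1 : Int)) 0 1
      = 1 :: List.replicate 10 (-1) by decide]
  rw [fA, if_neg (by norm_num)]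
  rw [show PySem.List.pyGet? (1 :: List.replicate 10 (-1 : Int)) ((1 : Int) - 1)
      = some 1 by decide]
  rfl

lemma solve_alt_one (K : Int) (SS : List (Int × Int)) : solve_alt 1 K SS = 1 := by
  unfold solve_alt
  rw [if_neg (by norm_num), PySem.List.pyRange_one_eq_nil (by norm_num), List.foldl_nil]
  rfl

-- ===== VERDICT (by name: the statement is the Claim_ definition above) =====
theorem solve_spec : Claim_equal_solve := by
  intro N K SS _hD hP
  unfold Spec_solve
  rcases hP with ⟨hN9, hSeg⟩
  by_cases hN : 1 ≤ N
  · by_cases h2 : 2 ≤ N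
    · rw [solve_eq_dp N K SS hN (hSeg h2), solve_alt_eq_dp N K SS hN (hSeg h2)]
    · rw [show N = 1 by omega, solve_one, solve_alt_one]
  · rw [solve_nonpos N K SS (by omega)]
    unfold solve_alt
    rw [if_pos (by omega)]
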